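-- pv_equiv track=rewrite | github.com/seoulmango/AlgorithmStudy2022 | Greedy/Textbook/quiz_11.6_3.py | solution
-- ===== SOURCE A (Python) =====
-- def solution(food_times, k):
--     answer = 0
--     time = 0
--     plate_idx = 0
--     food_num = len(food_times)
--     tries = 0
--     while True:
--         if food_times.count(0) == food_num:
--             answer = -1
--             break
--
--         # idx가 넘어가면 첫번째 음식으로 돌아오기
--         elif plate_idx == food_num:
--             plate_idx = 0
--
--         # 다 먹었다면 다음 음식으로
--         elif food_times[plate_idx] == 0:
--             plate_idx += 1
--
--         # 먹을 수 있는 음식이라면 먹기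
--         else:
--             food_times[plate_idx] -= 1
--             time += 1
--             # 시간 초과 시, 먹을 수 있는 다음 음식 앞에서 break
--             if time == k+1:
--                 answer = plate_idx + 1
--                 break
--             plate_idx += 1
--     return answer
-- ===== SOURCE B (Python) =====
-- def solution(food_times, k):
--     # Bulk level-skipping instead of second-by-second simulation.
--     # (A mutates food_times in place; B leaves it untouched -- equivalence is about the return value.)
--     ft = list(food_times)
--     while True:
--         c = sum(1 for t in ft if t != 0)
--         if c == 0:
--             return -1
--         if k < c:
--             alive = [i for i, t in enumerate(ft) if t != 0]
--             return alive[k] + 1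
--         pos = [t for t in ft if t > 0]
--         skip = min(min(pos), k // c) if pos else k // c
--         k -= skip * c
--         ft = [t - skip if t != 0 else t for t in ft]
-- ===== Notes on version B (the rewrite author's own statement) =====
-- stated objective: faster
-- what changed: B replaces A's second-by-second simulation (with a full count(0) scan before every single second) by bulk level-skipping: each iteration jumps min(min positive remaining, k//alive) whole rounds at once, so at most n+2 iterations of O(n) work.
-- outside the precondition, e.g. on solution([1, 1], -1): A returns -1, B returns 2
import Mathlib
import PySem

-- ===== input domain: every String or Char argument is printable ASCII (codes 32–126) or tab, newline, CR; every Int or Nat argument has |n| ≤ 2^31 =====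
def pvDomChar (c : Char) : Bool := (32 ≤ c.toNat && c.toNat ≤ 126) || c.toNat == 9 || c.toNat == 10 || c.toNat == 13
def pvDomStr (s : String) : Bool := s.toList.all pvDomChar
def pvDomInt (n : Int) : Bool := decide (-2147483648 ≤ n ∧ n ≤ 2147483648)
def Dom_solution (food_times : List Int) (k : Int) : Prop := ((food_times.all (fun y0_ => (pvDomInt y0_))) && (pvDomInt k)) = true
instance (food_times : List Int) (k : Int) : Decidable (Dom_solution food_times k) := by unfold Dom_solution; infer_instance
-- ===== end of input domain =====

-- B replaces A's second-by-second simulation by bulk round-skipping (at most n+2 passes);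
-- equivalence is about the return value (A mutates its food_times argument in place, B does not).

-- ===== PORT A =====
-- fuelled transcription of A's `while True` loop; the fuel chosen in `solution`
-- provably suffices on every input with 0 ≤ k (the loop runs at most k+sum+2 rounds
-- of at most length+1 iterations each)
def aLoop : Nat → List Int → Int → Int → Int → Int
  | 0, _, _, _, _ => 0
  | (fuel+1), ft, k, time, pi =>
    if PySem.List.count ft 0 = ft.length then -1
    else if pi = (ft.length : Int) then aLoop fuel ft k time 0
    else if (PySem.List.pyGet? ft pi).getD 0 = 0 then aLoop fuel ft k time (pi + 1)
    else
      let ft' := PySem.List.pySetD ft pi ((PySem.List.pyGet? ft pi).getD 0 - 1)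
      if time + 1 = k + 1 then pi + 1
      else aLoop fuel ft' k (time + 1) (pi + 1)

def solution (food_times : List Int) (k : Int) : Int :=
  aLoop ((k.toNat + (food_times.map Int.toNat).sum + 2) * (food_times.length + 1) + 1)
    food_times k 0 0

-- ===== PORT B =====
-- fuelled transcription of B's `while True` loop; length+2 iterations always
-- suffice since each iteration either returns, empties a plate, or makes k < c
def bLoop : Nat → List Int → Int → Int
  | 0, _, _ => -1
  | (fuel+1), ft, k =>
    let c := ft.countP (fun t => t ≠ 0)
    if c = 0 then -1
    else if k < (c : Int) then
      let alive := ((PySem.List.enumerate ft 0).filter (fun p => p.2 ≠ 0)).map (fun p => p.1)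
      (PySem.List.pyGet? alive k).getD 0 + 1
    else
      let pos := ft.filter (fun t => 0 < t)
      let skip := if pos = [] then PySem.Int.floordiv k (c : Int)
                  else min ((PySem.List.min? pos (fun t => t)).getD 0) (PySem.Int.floordiv k (c : Int))
      bLoop fuel (ft.map (fun t => if t ≠ 0 then t - skip else t)) (k - skip * (c : Int))

def solution_alt (food_times : List Int) (k : Int) : Int :=
  bLoop (food_times.length + 2) food_times k

-- ===== PRECONDITION & SPEC =====
-- Pre_ excludes negative k (not a meaningful number of seconds): there A diverges whenever some
-- plate can never empty, and otherwise drains every plate to return -1, while B's alive[k]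
-- negative indexing wraps or raises IndexError.
def Pre_solution (food_times : List Int) (k : Int) : Prop := 0 ≤ k
instance (food_times : List Int) (k : Int) : Decidable (Pre_solution food_times k) := by
  unfold Pre_solution; infer_instance

def pvWitness_solution : List Int × Int := ([3, 1, 2], 5)

def Spec_solution (food_times : List Int) (k : Int) (out : Int) : Prop := out = solution_alt food_times k
instance (food_times : List Int) (k : Int) (out : Int) : Decidable (Spec_solution food_times k out) := by unfold Spec_solution; infer_instance

-- ===== CLAIM (what is proved, stated in full; the proofs are below) =====
def Claim_equal_solution : Prop := ∀ (food_times : List Int) (k : Int), Dom_solution food_times k → Pre_solution food_times k → Spec_solution food_times k (solution food_times k)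

-- ===== LEMMAS AND PROOFS =====

-- one round of A's scan over a suffix, with r seconds still to serve:
-- `.inl j` = the r-th eatable plate is at offset j (A answers there),
-- `.inr (suf', r')` = the round ends with updated suffix and r' seconds left
def roundA : List Int → Int → Sum Nat (List Int × Int)
  | [], r => Sum.inr ([], r)
  | t :: ts, r =>
    if t = 0 then
      match roundA ts r with
      | Sum.inl j => Sum.inl (j + 1)
      | Sum.inr (ts', r') => Sum.inr (t :: ts', r')
    else if r = 1 then Sum.inl 0
    else match roundA ts (r - 1) with
      | Sum.inl j => Sum.inl (j + 1)
      | Sum.inr (ts', r') => Sum.inr ((t - 1) :: ts', r')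

-- A's loop, round by round
def simA : Nat → List Int → Int → Int
  | 0, _, _ => 0
  | (f+1), ft, r =>
    if PySem.List.count ft 0 = ft.length then -1
    else match roundA ft r with
      | Sum.inl j => (j : Int) + 1
      | Sum.inr (ft', r') => simA f ft' r'

-- indices of the nonzero entries (proof-side mirror of B's `alive`)
def aliveN : List Int → List Nat
  | [] => []
  | t :: ts => if t = 0 then (aliveN ts).map (· + 1) else 0 :: (aliveN ts).map (· + 1)



-- one-step unfolding equations (rfl) for the fuelled loops
lemma aLoop_succ (f : Nat) (ft : List Int) (k time pi : Int) :
    aLoop (f + 1) ft k time pi =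
      if PySem.List.count ft 0 = ft.length then -1
      else if pi = (ft.length : Int) then aLoop f ft k time 0
      else if (PySem.List.pyGet? ft pi).getD 0 = 0 then aLoop f ft k time (pi + 1)
      else if time + 1 = k + 1 then pi + 1
      else aLoop f (PySem.List.pySetD ft pi ((PySem.List.pyGet? ft pi).getD 0 - 1)) k
        (time + 1) (pi + 1) := rfl

lemma simA_succ (f : Nat) (ft : List Int) (r : Int) :
    simA (f + 1) ft r =
      if PySem.List.count ft 0 = ft.length then -1
      else match roundA ft r with
        | Sum.inl j => (j : Int) + 1
        | Sum.inr (ft', r') => simA f ft' r' := rfl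

lemma bLoop_succ (f : Nat) (ft : List Int) (k : Int) :
    bLoop (f + 1) ft k =
      if ft.countP (fun t => t ≠ 0) = 0 then -1
      else if k < (ft.countP (fun t => t ≠ 0) : Int) then
        (PySem.List.pyGet?
          (((PySem.List.enumerate ft 0).filter (fun p => p.2 ≠ 0)).map (fun p => p.1)) k).getD 0
          + 1
      else
        bLoop f
          (ft.map (fun t => if t ≠ 0 then t -
            (if ft.filter (fun t => 0 < t) = []
             then PySem.Int.floordiv k (ft.countP (fun t => t ≠ 0) : Int)
             else min ((PySem.List.min? (ft.filter (fun t => 0 < t)) (fun t => t)).getD 0)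
               (PySem.Int.floordiv k (ft.countP (fun t => t ≠ 0) : Int))) else t))
          (k - (if ft.filter (fun t => 0 < t) = []
             then PySem.Int.floordiv k (ft.countP (fun t => t ≠ 0) : Int)
             else min ((PySem.List.min? (ft.filter (fun t => 0 < t)) (fun t => t)).getD 0)
               (PySem.Int.floordiv k (ft.countP (fun t => t ≠ 0) : Int)))
            * (ft.countP (fun t => t ≠ 0) : Int)) := rfl

lemma allzero_iff (ft : List Int) :
    PySem.List.count ft 0 = ft.length ↔ ∀ t ∈ ft, t = 0 := by
  rw [PySem.List.count_eq, List.count_eq_length]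
  simp [eq_comm]

lemma nz_eq_zero_iff (ft : List Int) :
    ft.countP (fun t => t ≠ 0) = 0 ↔ ∀ t ∈ ft, t = 0 := by
  rw [List.countP_eq_zero]; simp

lemma length_aliveN (ft : List Int) : (aliveN ft).length = ft.countP (fun t => t ≠ 0) := by
  induction ft with
  | nil => simp [aliveN]
  | cons t ts ih => by_cases h : t = 0 <;> simp [aliveN, h, ih]

lemma alive_eq_map_aliveN (ft : List Int) (s : Int) :
    ((PySem.List.enumerate ft s).filter (fun p => p.2 ≠ 0)).map (fun p => p.1)
      = (aliveN ft).map (fun n : Nat => ((n : Int) + s)) := by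
  induction ft generalizing s with
  | nil => simp [PySem.List.enumerate_nil, aliveN]
  | cons t ts ih =>
    rw [PySem.List.enumerate_cons]
    by_cases h : t = 0
    · rw [List.filter_cons_of_neg (by simp [h]), ih (s + 1)]
      simp only [aliveN, if_pos h, List.map_map]
      apply List.map_congr_left
      intro n _
      simp only [Function.comp_apply]
      push_cast; ring
    · rw [List.filter_cons_of_pos (by simp [h]), List.map_cons, ih (s + 1)]
      simp only [aliveN, if_neg h, List.map_cons, List.map_map]
      refine congrArg₂ _ (by push_cast; ring) ?_
      apply List.map_congr_left
      intro n _
      simp only [Function.comp_apply]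
      push_cast; ring

lemma roundA_allzero (ft : List Int) (r : Int) (h : ∀ t ∈ ft, t = 0) :
    roundA ft r = Sum.inr (ft, r) := by
  induction ft with
  | nil => simp [roundA]
  | cons t ts ih =>
    have ht : t = 0 := h t (by simp)
    have hts : ∀ t ∈ ts, t = 0 := fun x hx => h x (by simp [hx])
    simp [roundA, ht, ih hts]

lemma roundA_inl (ft : List Int) (r : Nat) (hr : r < ft.countP (fun t => t ≠ 0)) :
    roundA ft ((r : Int) + 1) = Sum.inl ((aliveN ft).getD r 0) := by
  induction ft generalizing r with
  | nil => simp at hr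
  | cons t ts ih =>
    by_cases h : t = 0
    · have hr' : r < ts.countP (fun t => t ≠ 0) := by
        rwa [List.countP_cons_of_neg (by simp [h])] at hr
      have hlen : r < (aliveN ts).length := by rw [length_aliveN]; exact hr'
      simp [roundA, h, ih r hr', aliveN, List.getD_eq_getElem?_getD,
        List.getElem?_map, List.getElem?_eq_getElem hlen]
    · cases r with
      | zero => simp [roundA, h, aliveN]
      | succ r' =>
        have hr' : r' < ts.countP (fun t => t ≠ 0) := by
          rw [List.countP_cons_of_pos (by simp [h])] at hr; omega
        have hlen : r' < (aliveN ts).length := by rw [length_aliveN]; exact hr'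
        have hri : ((r' + 1 : Nat) : Int) + 1 - 1 = (r' : Int) + 1 := by push_cast; ring
        simp only [roundA, if_neg h]
        rw [if_neg (by push_cast; omega), hri, ih r' hr']
        simp [aliveN, h, List.getD_eq_getElem?_getD,
          List.getElem?_map, List.getElem?_eq_getElem hlen]

lemma roundA_full (ft : List Int) (r : Int) (h : (ft.countP (fun t => t ≠ 0) : Int) < r) :
    roundA ft r = Sum.inr (ft.map (fun t => if t ≠ 0 then t - 1 else t),
                           r - ft.countP (fun t => t ≠ 0)) := by
  induction ft generalizing r with
  | nil => simp [roundA]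
  | cons t ts ih =>
    by_cases ht : t = 0
    · have h' : (ts.countP (fun t => t ≠ 0) : Int) < r := by
        rwa [List.countP_cons_of_neg (by simp [ht])] at h
      rw [List.countP_cons_of_neg (by simp [ht])]
      simp [roundA, ht, ih r h']
    · have hcc : ((ts.countP (fun t => t ≠ 0) : Int)) + 1 < r := by
        rw [List.countP_cons_of_pos (by simp [ht])] at h; push_cast at h; omega
      have hnn : (0:Int) ≤ ts.countP (fun t => t ≠ 0) := by positivity
      have hr1 : r ≠ 1 := by omega
      have h' : (ts.countP (fun t => t ≠ 0) : Int) < r - 1 := by omega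
      rw [List.countP_cons_of_pos (by simp [ht])]
      simp only [roundA, if_neg ht, if_neg hr1, ih (r - 1) h']
      simp [ht]
      push_cast; ring

lemma roundA_length (ft : List Int) : ∀ (ft' : List Int) (r r' : Int),
    roundA ft r = Sum.inr (ft', r') → ft'.length = ft.length := by
  induction ft with
  | nil =>
    intro ft' r r' h
    simp only [roundA, Sum.inr.injEq, Prod.mk.injEq] at h
    rw [← h.1]
  | cons t ts ih =>
    intro ft' r r' h
    by_cases ht : t = 0
    · simp only [roundA, if_pos ht] at h
      rcases hrec : roundA ts r with j | ⟨ts', rr'⟩ <;> rw [hrec] at h <;> simp at h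
      obtain ⟨h1, h2⟩ := h
      rw [← h1]
      simp [ih ts' r rr' hrec]
    · simp only [roundA, if_neg ht] at h
      by_cases hr : r = 1
      · simp [hr] at h
      · rw [if_neg hr] at h
        rcases hrec : roundA ts (r - 1) with j | ⟨ts', rr'⟩ <;> rw [hrec] at h <;> simp at h
        obtain ⟨h1, h2⟩ := h
        rw [← h1]
        simp [ih ts' (r - 1) rr' hrec]

lemma roundA_pos (ft : List Int) : ∀ (ft' : List Int) (r r' : Int), 1 ≤ r →
    roundA ft r = Sum.inr (ft', r') → 1 ≤ r' := by
  induction ft with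
  | nil =>
    intro ft' r r' hr h
    simp only [roundA, Sum.inr.injEq, Prod.mk.injEq] at h
    omega
  | cons t ts ih =>
    intro ft' r r' hr h
    by_cases ht : t = 0
    · simp only [roundA, if_pos ht] at h
      rcases hrec : roundA ts r with j | ⟨ts', rr'⟩ <;> rw [hrec] at h <;> simp at h
      obtain ⟨h1, h2⟩ := h
      rw [← h2]
      exact ih ts' r rr' hr hrec
    · simp only [roundA, if_neg ht] at h
      by_cases hr1 : r = 1
      · simp [hr1] at h
      · rw [if_neg hr1] at h
        rcases hrec : roundA ts (r - 1) with j | ⟨ts', rr'⟩ <;> rw [hrec] at h <;> simp at h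
        obtain ⟨h1, h2⟩ := h
        rw [← h2]
        exact ih ts' (r - 1) rr' (by omega) hrec

lemma aLoop_allzero (f : Nat) (hf : 1 ≤ f) (ft : List Int) (k time pi : Int)
    (h : ∀ t ∈ ft, t = 0) : aLoop f ft k time pi = -1 := by
  obtain ⟨f', rfl⟩ : ∃ f', f = f' + 1 := ⟨f - 1, by omega⟩
  rw [aLoop_succ, if_pos ((allzero_iff ft).mpr h)]

-- the segment lemma: scanning the suffix `suf` from position `pre.length` is one round of A's loop
lemma seg (f : Nat) (hf : 1 ≤ f) (k : Int) (suf : List Int) : ∀ (pre : List Int) (time : Int),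
    time ≤ k →
    aLoop (f + suf.length + 1) (pre ++ suf) k time (pre.length : Int) =
      (match roundA suf (k + 1 - time) with
       | Sum.inl j => (pre.length : Int) + (j : Int) + 1
       | Sum.inr (suf', r') => aLoop f (pre ++ suf') k (k + 1 - r') 0) := by
  induction suf with
  | nil =>
    intro pre time ht
    simp only [List.append_nil, List.length_nil, Nat.add_zero, roundA]
    rw [aLoop_succ, show k + 1 - (k + 1 - time) = time from by ring]
    by_cases hz : PySem.List.count pre 0 = pre.length
    · rw [if_pos hz, aLoop_allzero f hf pre k time 0 ((allzero_iff pre).mp hz)]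
    · rw [if_neg hz, if_pos rfl]
  | cons t ts ih =>
    intro pre time ht
    have hfuel : f + (t :: ts).length + 1 = (f + ts.length + 1) + 1 := by
      simp [List.length_cons]; omega
    rw [hfuel, aLoop_succ]
    by_cases hz : PySem.List.count (pre ++ t :: ts) 0 = (pre ++ t :: ts).length
    · have hall := (allzero_iff _).mp hz
      have hround := roundA_allzero (t :: ts) (k + 1 - time)
        (fun x hx => hall x (by simp [hx]))
      rw [if_pos hz]
      simp only [hround]
      rw [show k + 1 - (k + 1 - time) = time from by ring,
        aLoop_allzero f hf _ k time 0 hall]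
    · have hpi : ¬((pre.length : Int) = ((pre ++ t :: ts).length : Int)) := by
        simp [List.length_append]; omega
      have hget : PySem.List.pyGet? (pre ++ t :: ts) (pre.length : Int) = some t :=
        PySem.List.pyGet?_append_length pre ts t
      rw [if_neg hz, if_neg hpi, hget]
      simp only [Option.getD_some]
      by_cases ht0 : t = 0
      · rw [if_pos ht0]
        rw [show (pre : List Int) ++ t :: ts = (pre ++ [t]) ++ ts from by simp,
            show ((pre.length : Int) + 1) = (((pre ++ [t]).length : Nat) : Int) from by simp]
        rw [ih (pre ++ [t]) time ht]
        rcases hrec : roundA ts (k + 1 - time) with j | ⟨ts', r'⟩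
        · have hR : roundA (t :: ts) (k + 1 - time) = Sum.inl (j + 1) := by
            simp [roundA, ht0, hrec]
          simp only [hR]
          simp only [List.length_append, List.length_cons, List.length_nil]
          push_cast; ring
        · have hR : roundA (t :: ts) (k + 1 - time) = Sum.inr (t :: ts', r') := by
            simp [roundA, ht0, hrec]
          simp only [hR]
          rw [show ((pre ++ [t]) ++ ts' : List Int) = pre ++ t :: ts' from by simp]
      · rw [if_neg ht0]
        have hset : PySem.List.pySetD (pre ++ t :: ts) (pre.length : Int) (t - 1)
            = pre ++ (t - 1) :: ts := by
          rw [PySem.List.pySetD_natCast]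
          simp
        by_cases hk1 : time + 1 = k + 1
        · rw [if_pos hk1]
          have hr1 : k + 1 - time = 1 := by omega
          have hR : roundA (t :: ts) (k + 1 - time) = Sum.inl 0 := by
            simp [roundA, ht0, hr1]
          simp only [hR]
          simp
        · rw [if_neg hk1, hset]
          have hne1 : k + 1 - time ≠ 1 := by omega
          rw [show (pre : List Int) ++ (t - 1) :: ts = (pre ++ [t - 1]) ++ ts from by simp,
              show ((pre.length : Int) + 1) = (((pre ++ [t - 1]).length : Nat) : Int) from by simp]
          rw [ih (pre ++ [t - 1]) (time + 1) (by omega)]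
          rw [show k + 1 - (time + 1) = k + 1 - time - 1 from by ring]
          rcases hrec : roundA ts (k + 1 - time - 1) with j | ⟨ts', r'⟩
          · have hR : roundA (t :: ts) (k + 1 - time) = Sum.inl (j + 1) := by
              simp [roundA, ht0, hne1, hrec]
            simp only [hR]
            simp only [List.length_append, List.length_cons, List.length_nil]
            push_cast; ring
          · have hR : roundA (t :: ts) (k + 1 - time) = Sum.inr ((t - 1) :: ts', r') := by
              simp [roundA, ht0, hne1, hrec]
            simp only [hR]
            rw [show ((pre ++ [t - 1]) ++ ts' : List Int) = pre ++ (t - 1) :: ts' from by simp]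

lemma A_eq_sim (f : Nat) : ∀ (ft : List Int) (k time : Int), time ≤ k →
    (k - time).toNat + 1 ≤ f →
    aLoop (f * (ft.length + 1) + 1) ft k time 0 = simA f ft (k + 1 - time) := by
  induction f with
  | zero => intro ft k time h1 h2; omega
  | succ f ih =>
    intro ft k time h1 h2
    rw [show f + 1 = f + 1 from rfl, simA_succ]
    by_cases hz : PySem.List.count ft 0 = ft.length
    · rw [if_pos hz, aLoop_allzero _ (Nat.succ_le_succ (Nat.zero_le _)) _ _ _ _ ((allzero_iff ft).mp hz)]
    · rw [if_neg hz]
      have hfuel : (f + 1) * (ft.length + 1) + 1 = (f * (ft.length + 1) + 1) + ft.length + 1 := by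
        ring
      rw [hfuel]
      have hseg := seg (f * (ft.length + 1) + 1) (by omega) k ft [] time h1
      simp only [List.nil_append, List.length_nil, Nat.cast_zero] at hseg
      rw [hseg]
      have hnz : 0 < ft.countP (fun t => t ≠ 0) := by
        rcases Nat.eq_zero_or_pos (ft.countP (fun t => t ≠ 0)) with h0 | h
        · exact absurd ((allzero_iff ft).mpr ((nz_eq_zero_iff ft).mp h0)) hz
        · exact h
      rcases hround : roundA ft (k + 1 - time) with j | ⟨ft', r'⟩ <;> simp only [hround]
      · simp
      · have hlen := roundA_length ft ft' (k + 1 - time) r' hround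
        have hr1 : (1:Int) ≤ k + 1 - time := by omega
        have hrpos := roundA_pos ft ft' (k + 1 - time) r' hr1 hround
        have hlt : (ft.countP (fun t => t ≠ 0) : Int) < k + 1 - time := by
          by_contra hge
          rw [not_lt] at hge
          have hρ : (k - time).toNat < ft.countP (fun t => t ≠ 0) := by omega
          have hinl := roundA_inl ft (k - time).toNat hρ
          rw [show (((k - time).toNat : Int) + 1) = k + 1 - time from by omega] at hinl
          rw [hinl] at hround
          simp at hround
        have hfull := roundA_full ft (k + 1 - time) hlt
        rw [hround, Sum.inr.injEq, Prod.mk.injEq] at hfull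
        obtain ⟨hft1, hrr⟩ := hfull
        have hcge : (1:Int) ≤ ft.countP (fun t => t ≠ 0) := by exact_mod_cast hnz
        have hrle : r' ≤ k - time := by omega
        have hih := ih ft' k (k + 1 - r') (by omega) (by omega)
        rw [show k + 1 - (k + 1 - r') = r' from by ring] at hih
        rw [hlen] at hih
        exact hih

-- s full rounds at once: every nonzero plate loses s, s * c seconds pass
lemma simA_skip (s : Nat) : ∀ (f : Nat) (ft : List Int) (r : Int),
    0 < ft.countP (fun t => t ≠ 0) →
    (∀ t ∈ ft, 0 < t → (s : Int) ≤ t) →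
    (s : Int) * ft.countP (fun t => t ≠ 0) < r →
    simA (f + s) ft r =
      simA f (ft.map (fun t => if t ≠ 0 then t - (s : Int) else t))
        (r - (s : Int) * ft.countP (fun t => t ≠ 0)) := by
  induction s with
  | zero =>
    intro f ft r _ _ _
    simp
  | succ s ih =>
    intro f ft r hc hpos hr
    have hcle : (1:Int) ≤ ft.countP (fun t => t ≠ 0) := by exact_mod_cast hc
    have hsnn : (0:Int) ≤ (s:Int) := by positivity
    have hr' : (s : Int) * ft.countP (fun t => t ≠ 0) < r := by
      push_cast at hr; nlinarith
    rw [show f + (s + 1) = (f + 1) + s from by omega]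
    rw [ih (f + 1) ft r hc (fun t htm htp => le_trans (by push_cast; omega) (hpos t htm htp)) hr']
    have hnzpt : ∀ t ∈ ft, t ≠ 0 → t - (s:Int) ≠ 0 := by
      intro t htm ht0
      rcases lt_or_gt_of_ne ht0 with hneg | hposv
      · omega
      · have := hpos t htm hposv; push_cast at this; omega
    have hc' : (ft.map (fun t => if t ≠ 0 then t - (s:Int) else t)).countP (fun t => t ≠ 0)
        = ft.countP (fun t => t ≠ 0) := by
      rw [List.countP_map]
      apply List.countP_congr
      intro t htm
      by_cases h0 : t = 0
      · simp [h0]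
      · simp [Function.comp_apply, h0, hnzpt t htm h0]
    have hnotall : ¬ (PySem.List.count (ft.map (fun t => if t ≠ 0 then t - (s:Int) else t)) 0
        = (ft.map (fun t => if t ≠ 0 then t - (s:Int) else t)).length) := by
      intro hzz
      have h0 := (nz_eq_zero_iff _).mpr ((allzero_iff _).mp hzz)
      omega
    have hclt : (ft.countP (fun t => t ≠ 0) : Int)
        < r - (s:Int) * ft.countP (fun t => t ≠ 0) := by
      push_cast at hr ⊢; nlinarith
    rw [simA_succ, if_neg hnotall,
      roundA_full (ft.map (fun t => if t ≠ 0 then t - (s:Int) else t)) _ (by rw [hc']; exact hclt)]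
    have hmap : (ft.map (fun t => if t ≠ 0 then t - (s:Int) else t)).map
          (fun t => if t ≠ 0 then t - 1 else t)
        = ft.map (fun t => if t ≠ 0 then t - ((s + 1 : Nat) : Int) else t) := by
      rw [List.map_map]
      apply List.map_congr_left
      intro t htm
      by_cases h0 : t = 0
      · simp [Function.comp_apply, h0]
      · have hne := hnzpt t htm h0
        simp only [Function.comp_apply, if_pos h0, if_pos hne]
        push_cast; ring
    have hrr : r - (s:Int) * ft.countP (fun t => t ≠ 0) - ft.countP (fun t => t ≠ 0)
        = r - ((s + 1 : Nat) : Int) * ft.countP (fun t => t ≠ 0) := by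
      push_cast; ring
    rw [hc', hmap, hrr]

lemma countP_lt (ft : List Int) (p q : Int → Bool) (x : Int) (hx : x ∈ ft)
    (hq : q x = true) (hp : p x = false) (himp : ∀ y ∈ ft, p y = true → q y = true) :
    ft.countP p < ft.countP q := by
  induction ft with
  | nil => simp at hx
  | cons t ts ih =>
    have hts : ∀ y ∈ ts, p y = true → q y = true := fun y hy => himp y (by simp [hy])
    have hle : ts.countP p ≤ ts.countP q :=
      List.countP_mono_left (by intro y hy hpy; exact hts y hy hpy)
    rcases List.mem_cons.mp hx with rfl | hx'
    · simp only [List.countP_cons, hq, hp]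
      simp; omega
    · have hlt := ih hx' hts
      by_cases hpt : p t = true
      · have hqt := himp t (by simp) hpt
        simp only [List.countP_cons, hpt, hqt]
        simp; omega
      · simp only [List.countP_cons, Bool.not_eq_true] at hpt ⊢
        simp [hpt]
        split_ifs <;> omega

-- the base case: fewer seconds left than nonzero plates — both return the same plate
lemma base_eq (ft : List Int) (kk : Int) (hk : 0 ≤ kk)
    (hkc : kk < (ft.countP (fun t => t ≠ 0) : Int)) (fs fb : Nat) (hfs : 1 ≤ fs) (hfb : 1 ≤ fb) :
    simA fs ft (kk + 1) = bLoop fb ft kk := by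
  obtain ⟨fs', rfl⟩ : ∃ x, fs = x + 1 := ⟨fs - 1, by omega⟩
  obtain ⟨fb', rfl⟩ : ∃ x, fb = x + 1 := ⟨fb - 1, by omega⟩
  have hρ : kk.toNat < ft.countP (fun t => t ≠ 0) := by omega
  have hc0 : ¬ (ft.countP (fun t => t ≠ 0) = 0) := by omega
  have hnotall : ¬ (PySem.List.count ft 0 = ft.length) := fun hzz => by
    have := (nz_eq_zero_iff ft).mpr ((allzero_iff ft).mp hzz); omega
  have hcast : ((kk.toNat : Int) + 1) = kk + 1 := by omega
  have hround := roundA_inl ft kk.toNat hρ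
  rw [hcast] at hround
  rw [simA_succ, if_neg hnotall]
  simp only [hround]
  rw [bLoop_succ, if_neg hc0, if_pos hkc, alive_eq_map_aliveN ft 0]
  have hlen : kk.toNat < (aliveN ft).length := by rw [length_aliveN]; exact hρ
  rw [PySem.List.pyGet?_of_nonneg _ hk]
  simp [List.getElem?_map, List.getElem?_eq_getElem hlen, List.getD_eq_getElem?_getD]

-- B's loop computes the round-by-round simulation
lemma main_eq (fb : Nat) : ∀ (ft : List Int) (k : Int) (fs : Nat), 0 ≤ k →
    k.toNat + 1 ≤ fs → ft.countP (fun t => t ≠ 0) + 2 ≤ fb →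
    simA fs ft (k + 1) = bLoop fb ft k := by
  induction fb with
  | zero => intro ft k fs hk hfs hfb; omega
  | succ fb ih =>
    intro ft k fs hk hfs hfb
    by_cases hc0 : ft.countP (fun t => t ≠ 0) = 0
    · obtain ⟨fs', rfl⟩ : ∃ x, fs = x + 1 := ⟨fs - 1, by omega⟩
      have hz : PySem.List.count ft 0 = ft.length :=
        (allzero_iff ft).mpr ((nz_eq_zero_iff ft).mp hc0)
      rw [simA_succ, if_pos hz, bLoop_succ, if_pos hc0]
    · by_cases hkc : k < (ft.countP (fun t => t ≠ 0) : Int)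
      · exact base_eq ft k hk hkc fs (fb + 1) (by omega) (by omega)
      · rw [not_lt] at hkc
        have hc0' : 0 < ft.countP (fun t => t ≠ 0) := Nat.pos_of_ne_zero hc0
        have hcI : (0:Int) < (ft.countP (fun t => t ≠ 0) : Int) := by exact_mod_cast hc0'
        have hkdc1 : 1 ≤ PySem.Int.floordiv k (ft.countP (fun t => t ≠ 0) : Int) :=
          (PySem.Int.le_floordiv_iff_mul_le hcI).mpr (by linarith)
        have hkdcc : PySem.Int.floordiv k (ft.countP (fun t => t ≠ 0) : Int) *
            (ft.countP (fun t => t ≠ 0) : Int) ≤ k := by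
          have h1 := PySem.Int.floordiv_mul_add_mod k (ft.countP (fun t => t ≠ 0) : Int)
          have h2 := PySem.Int.mod_nonneg k hcI
          linarith
        have hkdck : PySem.Int.floordiv k (ft.countP (fun t => t ≠ 0) : Int) ≤ k := by
          nlinarith
        by_cases hsplit : (ft.filter (fun t => 0 < t) ≠ [] ∧
            ((PySem.List.min? (ft.filter (fun t => 0 < t)) (fun t => t)).getD 0
              ≤ PySem.Int.floordiv k (ft.countP (fun t => t ≠ 0) : Int)))
        · -- case (a): skip `m` full rounds at once; the cheapest plate empties
          obtain ⟨hpos, hmle⟩ := hsplit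
          have hsome : PySem.List.min? (ft.filter (fun t => 0 < t)) (fun t => t) ≠ none :=
            fun hnone => hpos ((PySem.List.min?_eq_none_iff _ _).mp hnone)
          obtain ⟨m, hm⟩ := Option.ne_none_iff_exists'.mp hsome
          rw [hm] at hmle
          simp only [Option.getD_some] at hmle
          have hm_mem := PySem.List.min?_mem hm
          have hm_ft : m ∈ ft := (List.mem_filter.mp hm_mem).1
          have hm_pos : (0:Int) < m := by
            have := (List.mem_filter.mp hm_mem).2; simpa using this
          have hm_min : ∀ y ∈ ft, 0 < y → m ≤ y := by
            intro y hy hyp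
            exact PySem.List.min?_isMin hm y (List.mem_filter.mpr ⟨hy, by simpa using hyp⟩)
          have hmc_le : m * (ft.countP (fun t => t ≠ 0) : Int) ≤ k := by
            calc m * (ft.countP (fun t => t ≠ 0) : Int)
                ≤ PySem.Int.floordiv k (ft.countP (fun t => t ≠ 0) : Int) *
                  (ft.countP (fun t => t ≠ 0) : Int) :=
                  mul_le_mul_of_nonneg_right hmle (le_of_lt hcI)
              _ ≤ k := hkdcc
          have hm_le_k : m ≤ k := by nlinarith
          have hcastm : ((m.toNat : Int)) = m := Int.toNat_of_nonneg (le_of_lt hm_pos)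
          have hs_fs : m.toNat ≤ fs := by omega
          rw [show fs = (fs - m.toNat) + m.toNat from by omega]
          rw [simA_skip m.toNat (fs - m.toNat) ft (k + 1) hc0'
            (by intro t htm htp; rw [hcastm]; exact hm_min t htm htp)
            (by rw [hcastm]; linarith)]
          rw [bLoop_succ, if_neg hc0, if_neg (not_lt.mpr hkc), if_neg hpos, hm]
          simp only [Option.getD_some]
          rw [min_eq_left hmle, hcastm]
          have hdec : (ft.map (fun t => if t ≠ 0 then t - m else t)).countP (fun t => t ≠ 0)
              < ft.countP (fun t => t ≠ 0) := by
            rw [List.countP_map]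
            refine countP_lt ft _ _ m hm_ft (by simp [ne_of_gt hm_pos]) ?_ ?_
            · simp [ne_of_gt hm_pos]
            · intro y hy hpy
              by_cases hy0 : y = 0
              · simp [hy0] at hpy
              · simp [hy0]
          obtain ⟨K, hK⟩ : ∃ K : Int, k - m * (ft.countP (fun t => t ≠ 0) : Int) = K := ⟨_, rfl⟩
          have hK0 : 0 ≤ K := by rw [← hK]; linarith
          have hKle : K ≤ k - m := by
            rw [← hK]; nlinarith
          rw [show k + 1 - m * (ft.countP (fun t => t ≠ 0) : Int) = K + 1 from by
            rw [← hK]; ring]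
          rw [show k - m * (ft.countP (fun t => t ≠ 0) : Int) = K from hK]
          exact ih (ft.map (fun t => if t ≠ 0 then t - m else t)) K (fs - m.toNat) hK0
            (by omega) (by omega)
        · -- case (b): skip = k // c rounds; afterwards k < c and both sides answer
          have hskip_le : ∀ t ∈ ft, 0 < t →
              PySem.Int.floordiv k (ft.countP (fun t => t ≠ 0) : Int) < t := by
            intro t htm htp
            by_cases hpos : ft.filter (fun t => 0 < t) = []
            · exact absurd (by simpa using htp)
                (List.filter_eq_nil_iff.mp hpos t htm)
            · have hsome : PySem.List.min? (ft.filter (fun t => 0 < t)) (fun t => t) ≠ none :=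
                fun hnone => hpos ((PySem.List.min?_eq_none_iff _ _).mp hnone)
              obtain ⟨m, hm⟩ := Option.ne_none_iff_exists'.mp hsome
              have hmgt : PySem.Int.floordiv k (ft.countP (fun t => t ≠ 0) : Int) < m := by
                by_contra hle
                rw [not_lt] at hle
                exact hsplit ⟨hpos, by rw [hm]; simpa using hle⟩
              have := PySem.List.min?_isMin hm t (List.mem_filter.mpr ⟨htm, by simpa using htp⟩)
              omega
          have hnzpres : ∀ t ∈ ft, t ≠ 0 →
              t - PySem.Int.floordiv k (ft.countP (fun t => t ≠ 0) : Int) ≠ 0 := by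
            intro t htm ht0
            rcases lt_or_gt_of_ne ht0 with hneg | hposv
            · omega
            · have := hskip_le t htm hposv; omega
          have hcastm : ((PySem.Int.floordiv k (ft.countP (fun t => t ≠ 0) : Int)).toNat : Int)
              = PySem.Int.floordiv k (ft.countP (fun t => t ≠ 0) : Int) :=
            Int.toNat_of_nonneg (by omega)
          have hs_fs : (PySem.Int.floordiv k (ft.countP (fun t => t ≠ 0) : Int)).toNat ≤ fs := by
            omega
          rw [show fs = (fs - (PySem.Int.floordiv k (ft.countP (fun t => t ≠ 0) : Int)).toNat)
              + (PySem.Int.floordiv k (ft.countP (fun t => t ≠ 0) : Int)).toNat from by omega]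
          rw [simA_skip _ _ ft (k + 1) hc0'
            (by intro t htm htp; rw [hcastm]; exact le_of_lt (hskip_le t htm htp))
            (by rw [hcastm]; linarith)]
          rw [hcastm]
          -- B makes the same jump in one iteration
          have hbstep : bLoop (fb + 1) ft k
              = bLoop fb
                  (ft.map (fun t => if t ≠ 0 then
                    t - PySem.Int.floordiv k (ft.countP (fun t => t ≠ 0) : Int) else t))
                  (k - PySem.Int.floordiv k (ft.countP (fun t => t ≠ 0) : Int) *
                    (ft.countP (fun t => t ≠ 0) : Int)) := by
            by_cases hpos : ft.filter (fun t => 0 < t) = []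
            · rw [bLoop_succ, if_neg hc0, if_neg (not_lt.mpr hkc), if_pos hpos]
            · have hsome : PySem.List.min? (ft.filter (fun t => 0 < t)) (fun t => t) ≠ none :=
                fun hnone => hpos ((PySem.List.min?_eq_none_iff _ _).mp hnone)
              obtain ⟨m, hm⟩ := Option.ne_none_iff_exists'.mp hsome
              have hmgt : PySem.Int.floordiv k (ft.countP (fun t => t ≠ 0) : Int) < m := by
                by_contra hle
                rw [not_lt] at hle
                exact hsplit ⟨hpos, by rw [hm]; simpa using hle⟩
              rw [bLoop_succ, if_neg hc0, if_neg (not_lt.mpr hkc), if_neg hpos, hm]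
              simp only [Option.getD_some]
              rw [min_eq_right (le_of_lt hmgt)]
          rw [hbstep]
          have hcnt : (ft.map (fun t => if t ≠ 0 then
                t - PySem.Int.floordiv k (ft.countP (fun t => t ≠ 0) : Int) else t)).countP
                (fun t => t ≠ 0)
              = ft.countP (fun t => t ≠ 0) := by
            rw [List.countP_map]
            apply List.countP_congr
            intro t htm
            simp only [Function.comp_apply, decide_eq_true_eq]
            by_cases ht0 : t = 0
            · simp [ht0]
            · rw [if_pos ht0]
              exact iff_of_true (hnzpres t htm ht0) ht0
          have hmod : k - PySem.Int.floordiv k (ft.countP (fun t => t ≠ 0) : Int) *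
              (ft.countP (fun t => t ≠ 0) : Int)
              = PySem.Int.mod k (ft.countP (fun t => t ≠ 0) : Int) := by
            have h1 := PySem.Int.floordiv_mul_add_mod k (ft.countP (fun t => t ≠ 0) : Int)
            linarith
          obtain ⟨K, hK⟩ : ∃ K : Int, k - PySem.Int.floordiv k
              (ft.countP (fun t => t ≠ 0) : Int) * (ft.countP (fun t => t ≠ 0) : Int) = K :=
            ⟨_, rfl⟩
          have hK0 : 0 ≤ K := by
            rw [← hK, hmod]; exact PySem.Int.mod_nonneg k hcI
          have hKlt : K < (ft.countP (fun t => t ≠ 0) : Int) := by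
            rw [← hK, hmod]; exact PySem.Int.mod_lt k hcI
          rw [show k + 1 - PySem.Int.floordiv k (ft.countP (fun t => t ≠ 0) : Int) *
              (ft.countP (fun t => t ≠ 0) : Int) = K + 1 from by rw [← hK]; ring]
          rw [show k - PySem.Int.floordiv k (ft.countP (fun t => t ≠ 0) : Int) *
              (ft.countP (fun t => t ≠ 0) : Int) = K from hK]
          exact base_eq _ K hK0 (by rw [hcnt]; exact hKlt) _ _ (by omega) (by omega)

-- ===== VERDICT (by name: the statement is the Claim_ definition above) =====
theorem solution_spec : Claim_equal_solution := by
  intro ft k _ hk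
  have hk' : 0 ≤ k := hk
  unfold Spec_solution solution solution_alt
  have h1 := A_eq_sim (k.toNat + (ft.map Int.toNat).sum + 2) ft k 0 hk' (by omega)
  rw [show k + 1 - 0 = k + 1 from by ring] at h1
  rw [h1]
  exact main_eq (ft.length + 2) ft k (k.toNat + (ft.map Int.toNat).sum + 2) hk' (by omega)
    (by have := List.countP_le_length (p := fun t : Int => decide (t ≠ 0)) (l := ft); omega)
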